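-- pv_equiv track=rewrite | github.com/Gandalf-/diving | diving/locations.py | _pretty_year_range
-- ===== SOURCE A (Python) =====
-- from typing import Dict, List, Optional, Set, cast
--
-- def _pretty_year_range(years: Set[int]) -> str:
--     """1, 3, 4, 6 -> 1, 3-4, 6"""
--     out = []
--     years = sorted(list(years))
--
--     while years:
--         start = years.pop(0)
--         end = start
--
--         while years and years[0] == end + 1:
--             end = years.pop(0)
--
--         if start == end:
--             out.append(str(start))
--         else:
--             out.append(f'{start}-{end}')
--
--     return ', '.join(out)
-- ===== SOURCE B (Python) =====
-- def _pretty_year_range(years):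
--     """1, 3, 4, 6 -> 1, 3-4, 6"""
--     pieces = []
--     start = end = key = None
--     for i, y in enumerate(sorted(years)):
--         # y - i is constant exactly along a maximal run of consecutive integers
--         if key is not None and y - i == key:
--             end = y
--         else:
--             if key is not None:
--                 pieces.append(str(start) if start == end else f'{start}-{end}')
--             start = end = y
--             key = y - i
--     if key is not None:
--         pieces.append(str(start) if start == end else f'{start}-{end}')
--     return ', '.join(pieces)
-- ===== Notes on version B (the rewrite author's own statement) =====
-- stated objective: alternative
-- what changed: Replaces the nested pop(0)/extend while-loops on a mutated list by a single indexed pass over the sorted list that groups by the invariant key y - i (constant exactly on maximal consecutive runs), detecting run boundaries by a key change.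
import Mathlib
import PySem

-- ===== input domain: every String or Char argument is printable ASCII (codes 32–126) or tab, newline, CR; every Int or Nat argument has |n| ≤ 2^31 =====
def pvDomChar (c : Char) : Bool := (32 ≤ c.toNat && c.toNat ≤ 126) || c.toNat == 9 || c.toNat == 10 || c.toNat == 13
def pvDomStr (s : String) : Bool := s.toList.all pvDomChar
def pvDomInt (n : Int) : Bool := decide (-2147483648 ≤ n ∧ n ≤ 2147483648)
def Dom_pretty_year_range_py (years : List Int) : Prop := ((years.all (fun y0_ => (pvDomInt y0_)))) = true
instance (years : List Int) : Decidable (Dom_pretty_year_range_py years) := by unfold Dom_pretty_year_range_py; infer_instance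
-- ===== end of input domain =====

-- B replaces A's nested pop(0) loops by one indexed pass grouping by the key y - i (alternative algorithm, O(n) after sort).

-- ===== PORT A =====
-- str(start) if start == end else f'{start}-{end}'  (identical expression in both Pythons)
def pvPiece (s e : Int) : String :=
  if s = e then PySem.Int.toStr s else PySem.Int.toStr s ++ "-" ++ PySem.Int.toStr e

-- inner while: consume years while years[0] == end + 1; returns (end, remaining years)
def pvAInner (e : Int) : List Int → Int × List Int
  | [] => (e, [])
  | y :: ys => if y = e + 1 then pvAInner y ys else (e, y :: ys)

theorem pvAInner_len (e : Int) (l : List Int) : (pvAInner e l).2.length ≤ l.length := by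
  induction l generalizing e with
  | nil => simp [pvAInner]
  | cons y ys ih =>
    simp only [pvAInner]
    split
    · exact Nat.le_trans (ih y) (Nat.le_succ _)
    · simp

-- outer while: pop start, extend the run, append the piece to out
def pvALoop : List Int → List String → List String
  | [], out => out
  | start :: ys, out =>
      let p := pvAInner start ys
      pvALoop p.2 (out ++ [pvPiece start p.1])
termination_by l _ => l.length
decreasing_by
  exact Nat.lt_succ_of_le (pvAInner_len start ys)

def pretty_year_range_py (years : List Int) : String :=
  PySem.Str.join ", " (pvALoop (PySem.List.sorted years (fun y => y) false) [])

-- ===== PORT B =====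
-- for i, y in enumerate(sorted(years)): state = (pieces, current group as Option (start, end, key))
def pvBGo : List Int → Int → List String → Option (Int × Int × Int) → List String
  | [], _, pieces, st =>
      pieces ++ (match st with | none => [] | some (s, e, _) => [pvPiece s e])
  | y :: ys, i, pieces, st =>
      match st with
      | some (s, e, k) =>
          if y - i = k then pvBGo ys (i + 1) pieces (some (s, y, k))
          else pvBGo ys (i + 1) (pieces ++ [pvPiece s e]) (some (y, y, y - i))
      | none => pvBGo ys (i + 1) pieces (some (y, y, y - i))

def pretty_year_range_py_alt (years : List Int) : String :=
  PySem.Str.join ", " (pvBGo (PySem.List.sorted years (fun y => y) false) 0 [] none)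

-- ===== PRECONDITION & SPEC =====
def Spec_pretty_year_range_py (years : List Int) (out : String) : Prop := out = pretty_year_range_py_alt years
instance (years : List Int) (out : String) : Decidable (Spec_pretty_year_range_py years out) := by unfold Spec_pretty_year_range_py; infer_instance

-- ===== CLAIM (what is proved, stated in full; the proofs are below) =====
def Claim_equal_pretty_year_range_py : Prop := ∀ (years : List Int), Dom_pretty_year_range_py years → Spec_pretty_year_range_py years (pretty_year_range_py years)

-- ===== LEMMAS AND PROOFS =====

-- While a group (s, e, k) is open with next index i, the invariant k = e - i + 1 holds, so
-- B's key test 'y - i = k' is exactly A's run test 'y = e + 1'.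
theorem pvBGo_eq_pvALoop (l : List Int) (i : Int) (pieces : List String) (s e : Int) :
    pvBGo l i pieces (some (s, e, e - i + 1)) =
      pvALoop (pvAInner e l).2 (pieces ++ [pvPiece s (pvAInner e l).1]) := by
  induction l generalizing i pieces s e with
  | nil => simp [pvBGo, pvAInner, pvALoop]
  | cons y ys ih =>
    simp only [pvBGo, pvAInner]
    by_cases h : y = e + 1
    · have hk : y - i = e - i + 1 := by omega
      have hk2 : e - i + 1 = y - (i + 1) + 1 := by omega
      rw [if_pos hk, if_pos h, hk2, ih]
    · have hk : ¬ (y - i = e - i + 1) := by omega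
      rw [if_neg hk, if_neg h]
      have hk3 : y - i = y - (i + 1) + 1 := by omega
      rw [hk3, ih]
      simp [pvALoop]

theorem pvBGo_eq_pvALoop_top (l : List Int) : pvBGo l 0 [] none = pvALoop l [] := by
  cases l with
  | nil => simp [pvBGo, pvALoop]
  | cons y ys =>
    simp only [pvBGo, pvALoop]
    have h : y - 0 = y - (0 + 1) + 1 := by omega
    rw [h, pvBGo_eq_pvALoop]

-- ===== VERDICT (by name: the statement is the Claim_ definition above) =====
theorem pretty_year_range_py_spec : Claim_equal_pretty_year_range_py := by
  intro years _
  unfold Spec_pretty_year_range_py pretty_year_range_py pretty_year_range_py_alt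
  rw [pvBGo_eq_pvALoop_top]
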